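-- pv_equiv track=rewrite | github.com/shiqi-lu/roam2md | roam2md.py | split_prefix_content
-- ===== SOURCE A (Python) =====
-- PREFIX = ["", "- ", " " * 4 + "- ", " " * 8 + "- ", " " * 12 + "- ", " " * 16 + "- ", " " * 20 + "- ",
--           " " * 24 + "- ", " " * 28 + "- ", " " * 32 + "- ", " " * 36 + "- ", " " * 40 + "- ", ]
--
-- def split_prefix_content(line):
--     """提取前缀，文字，级别"""
--     for prefix in PREFIX[::-1]:
--         if line.startswith(prefix):
--             if len(prefix) == 0:
--                 level = 0
--             else:
--                 level = (len(prefix) - 2) // 4 + 1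
--             return prefix, line[len(prefix):], level
--     assert "Can't be here"
-- ===== SOURCE B (Python) =====
-- def split_prefix_content(line):
--     """提取前缀，文字，级别"""
--     n = 0
--     while n < len(line) and line[n] == ' ':
--         n += 1
--     if n % 4 == 0 and n <= 40 and line[n:n + 2] == '- ':
--         return ' ' * n + '- ', line[n + 2:], n // 4 + 1
--     return '', line, 0
-- ===== Notes on version B (the rewrite author's own statement) =====
-- stated objective: simpler
-- what changed: Replaces A's scan over the reversed 12-entry constant prefix table (a startswith test per entry) with a direct count of leading spaces plus a modular-arithmetic check (n%4==0, n<=40, then '- ') and level formula n//4+1.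
import Mathlib
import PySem

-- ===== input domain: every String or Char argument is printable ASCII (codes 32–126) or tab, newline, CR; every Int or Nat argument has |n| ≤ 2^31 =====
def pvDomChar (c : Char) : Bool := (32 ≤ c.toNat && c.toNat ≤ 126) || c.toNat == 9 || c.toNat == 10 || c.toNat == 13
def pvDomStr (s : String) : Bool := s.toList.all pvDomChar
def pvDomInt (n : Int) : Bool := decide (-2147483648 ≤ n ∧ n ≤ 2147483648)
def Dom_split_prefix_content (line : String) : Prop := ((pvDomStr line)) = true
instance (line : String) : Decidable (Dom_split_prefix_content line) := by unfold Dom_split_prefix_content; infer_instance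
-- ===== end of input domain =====

-- B replaces A's scan over the reversed constant prefix table by a direct
-- leading-space count and a modular-arithmetic level formula (objective: simpler).

-- ===== PORT A =====
-- PREFIX = ["", "- ", " "*4 + "- ", ..., " "*40 + "- "] (literal values)
def PREFIX : List String :=
  ["", "- ", "    - ", "        - ", "            - ", "                - ",
   "                    - ", "                        - ", "                            - ",
   "                                - ", "                                    - ",
   "                                        - "]

-- the for-loop: first prefix of the list that line starts with
def goA (line : String) : List String → String × String × Int
  | [] => ("", line, 0)   -- unreachable in Python ("" always matches)
  | p :: rest =>
    if PySem.Str.startswith line p then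
      (p, PySem.Str.slice line (some (PySem.Str.len p)) none,
        if PySem.Str.len p = 0 then 0 else PySem.Int.floordiv (PySem.Str.len p - 2) 4 + 1)
    else goA line rest

def split_prefix_content (line : String) : String × String × Int :=
  goA line PREFIX.reverse

-- ===== PORT B =====
-- the while-loop counting leading spaces
def countSpaces : List Char → Nat
  | [] => 0
  | c :: t => if c = ' ' then countSpaces t + 1 else 0

def split_prefix_content_alt (line : String) : String × String × Int :=
  let n := countSpaces line.toList
  if n % 4 = 0 ∧ n ≤ 40 ∧ PySem.Str.slice line (some (n : Int)) (some ((n : Int) + 2)) = "- " then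
    (String.ofList (List.replicate n ' ' ++ ['-', ' ']),
     PySem.Str.slice line (some ((n : Int) + 2)) none,
     ((n / 4 : Nat) : Int) + 1)
  else ("", line, 0)

-- ===== PRECONDITION & SPEC =====
def Spec_split_prefix_content (line : String) (out : String × String × Int) : Prop := out = split_prefix_content_alt line
instance (line : String) (out : String × String × Int) : Decidable (Spec_split_prefix_content line out) := by unfold Spec_split_prefix_content; infer_instance

-- ===== CLAIM (what is proved, stated in full; the proofs are below) =====
def Claim_equal_split_prefix_content : Prop := ∀ (line : String), Dom_split_prefix_content line → Spec_split_prefix_content line (split_prefix_content line)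

-- ===== LEMMAS AND PROOFS =====

-- `countSpaces` is the length of the leading-space run
lemma match_iff (k : Nat) (l : List Char) :
    (List.replicate k ' ' ++ ['-', ' ']) <+: l ↔
      (countSpaces l = k ∧ ['-', ' '] <+: l.drop k) := by
  induction k generalizing l with
  | zero =>
    cases l with
    | nil => simp
    | cons c t =>
      by_cases hc : c = ' '
      · subst hc
        simp [countSpaces, List.cons_prefix_cons]
      · simp [countSpaces, hc, List.cons_prefix_cons]
  | succ k ih =>
    cases l with
    | nil => simp [countSpaces, List.replicate_succ]
    | cons c t =>
      by_cases hc : c = ' '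
      · subst hc
        simp [countSpaces, List.replicate_succ, List.cons_prefix_cons, ih]
      · simp [countSpaces, hc, List.replicate_succ, List.cons_prefix_cons]
        intro h; exact absurd h.symm hc

def pLit (k : Nat) : String := String.ofList (List.replicate k ' ' ++ ['-', ' '])

lemma toList_pLit (k : Nat) : (pLit k).toList = List.replicate k ' ' ++ ['-', ' '] := by
  simp [pLit]

lemma startswith_pLit (line : String) (k : Nat) :
    PySem.Str.startswith line (pLit k) = true ↔
      (countSpaces line.toList = k ∧ ['-', ' '] <+: line.toList.drop k) := by
  rw [PySem.Str.startswith_eq, PySem.Chars.startswith_iff, toList_pLit, match_iff]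

lemma len_pLit (k : Nat) : PySem.Str.len (pLit k) = (k : Int) + 2 := by
  simp [PySem.Str.len_eq, toList_pLit]

lemma slice_zero (s : String) : PySem.Str.slice s (some 0) none = s := by
  simp [PySem.Str.slice]

lemma chain_eval (line : String) (ks : List Nat) :
    goA line (ks.map pLit ++ [""]) =
      (if countSpaces line.toList ∈ ks ∧ ['-', ' '] <+: line.toList.drop (countSpaces line.toList) then
        (pLit (countSpaces line.toList),
         PySem.Str.slice line (some ((countSpaces line.toList : Int) + 2)) none,
         ((countSpaces line.toList / 4 : Nat) : Int) + 1)
      else ("", line, 0)) := by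
  induction ks with
  | nil =>
    simp [goA, slice_zero, PySem.Str.len]
  | cons k rest ih =>
    by_cases hk : countSpaces line.toList = k
    · subst hk
      by_cases hd : ['-', ' '] <+: line.toList.drop (countSpaces line.toList)
      · simp only [List.map_cons, List.cons_append, goA]
        have hpos : countSpaces line.toList ∈ countSpaces line.toList :: rest ∧
            ['-', ' '] <+: line.toList.drop (countSpaces line.toList) := ⟨by simp, hd⟩
        rw [if_pos ((startswith_pLit line _).mpr ⟨rfl, hd⟩), if_pos hpos, len_pLit]
        have hne : ¬ ((countSpaces line.toList : Int) + 2 = 0) := by omega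
        rw [if_neg hne]
        simp only [Prod.mk.injEq]
        refine ⟨trivial, trivial, ?_⟩
        rw [show ((countSpaces line.toList : Int) + 2 - 2) = ((countSpaces line.toList : Nat) : Int) by ring]
        simp [PySem.Int.floordiv, Int.fdiv_eq_ediv]
      · simp only [List.map_cons, List.cons_append, goA]
        rw [if_neg (fun h => hd ((startswith_pLit line _).mp h).2), ih,
          if_neg (by tauto), if_neg (by tauto)]
    · simp only [List.map_cons, List.cons_append, goA]
      rw [if_neg (fun h => hk ((startswith_pLit line k).mp h).1), ih]
      have hmem : (countSpaces line.toList ∈ k :: rest) ↔ (countSpaces line.toList ∈ rest) := by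
        simp [hk]
      simp only [hmem]

lemma slice_two_iff (line : String) (n : Nat) :
    PySem.Str.slice line (some (n : Int)) (some ((n : Int) + 2)) = "- " ↔
      ['-', ' '] <+: line.toList.drop n := by
  have h2 : ((n : Int) + 2) = ((n + 2 : Nat) : Int) := by push_cast; ring
  rw [← String.toList_inj, PySem.Str.toList_slice, h2]
  have hs : PySem.Chars.slice line.toList (some ((n : Nat) : Int)) (some (((n + 2 : Nat) : Nat) : Int))
      = (line.toList.drop n).take 2 := by
    simp only [PySem.Chars.slice]
    rw [PySem.List.slice_natCast]
    congr 1
    omega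
  have ht : ("- ").toList = ['-', ' '] := by decide
  rw [hs, ht, List.prefix_iff_eq_take]
  simp [eq_comm]

lemma prefix_reverse_eq : PREFIX.reverse = ([40, 36, 32, 28, 24, 20, 16, 12, 8, 4, 0].map pLit ++ [""]) := by
  decide

-- ===== VERDICT (by name: the statement is the Claim_ definition above) =====
theorem split_prefix_content_spec : Claim_equal_split_prefix_content := by
  intro line _
  unfold Spec_split_prefix_content split_prefix_content split_prefix_content_alt
  rw [prefix_reverse_eq, chain_eval]
  set n := countSpaces line.toList with hn
  by_cases hd : ['-', ' '] <+: line.toList.drop n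
  · have hmem : (n ∈ [40, 36, 32, 28, 24, 20, 16, 12, 8, 4, 0]) ↔ (n % 4 = 0 ∧ n ≤ 40) := by
      simp; omega
    by_cases hb : n % 4 = 0 ∧ n ≤ 40
    · rw [if_pos ⟨hmem.mpr hb, hd⟩,
        if_pos ⟨hb.1, hb.2, (slice_two_iff line n).mpr hd⟩]
      rfl
    · rw [if_neg (fun h => hb (hmem.mp h.1)),
        if_neg (fun h => hb ⟨h.1, h.2.1⟩)]
  · rw [if_neg (by tauto), if_neg (fun h => hd ((slice_two_iff line n).mp h.2.2))]
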